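-- pv_equiv track=rewrite | github.com/da-mkay/subsynco | src/subsynco/media/submod.py | _merge_by_ids
-- ===== SOURCE A (Python) =====
-- def _merge_by_ids(vals_by_id):
--     """Merges successive ids with the same value.
--
--     Returns a list of [id1, id2, value]-objects such that
--     vals_by_id maps each key from id1 to id2 (incl.) to value.
--
--     Example:
--     If vals_by_id is {1:'a', 3:'b', 2:'a'} then the following would
--     be returned: [[1, 2, 'a'], [3, 3, 'b']]
--     """
--     merged_ids = []
--     for id_ in sorted(vals_by_id.keys()):
--         new = True
--         new_value = vals_by_id[id_]
--         if merged_ids: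
--             id1, id2, value = merged_ids[-1]
--             if id2+1==id_ and value==new_value:
--                 merged_ids[-1][1] = id_
--                 new = False
--         if new:
--             merged_ids.append([id_, id_, new_value])
--     return merged_ids
-- ===== SOURCE B (Python) =====
-- from itertools import groupby
--
-- def _merge_by_ids(vals_by_id):
--     merged = []
--     ids = sorted(vals_by_id.keys())
--     # key stays constant exactly across a maximal run of consecutive ids
--     # sharing one value
--     for _, group in groupby(enumerate(ids),
--                             key=lambda p: (vals_by_id[p[1]], p[1] - p[0])):
--         run = [id_ for _, id_ in group]
--         merged.append([run[0], run[-1], vals_by_id[run[0]]])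
--     return merged
-- ===== Notes on version B (the rewrite author's own statement) =====
-- stated objective: idiomatic
-- what changed: B computes the maximal runs of consecutive equal-valued ids directly with itertools.groupby over enumerate(sorted ids), keyed on (value, id - index), and emits one [first, last, value] triple per group, instead of A's loop that compares each id with the previously appended triple and mutates its last element in place.
import Mathlib
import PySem

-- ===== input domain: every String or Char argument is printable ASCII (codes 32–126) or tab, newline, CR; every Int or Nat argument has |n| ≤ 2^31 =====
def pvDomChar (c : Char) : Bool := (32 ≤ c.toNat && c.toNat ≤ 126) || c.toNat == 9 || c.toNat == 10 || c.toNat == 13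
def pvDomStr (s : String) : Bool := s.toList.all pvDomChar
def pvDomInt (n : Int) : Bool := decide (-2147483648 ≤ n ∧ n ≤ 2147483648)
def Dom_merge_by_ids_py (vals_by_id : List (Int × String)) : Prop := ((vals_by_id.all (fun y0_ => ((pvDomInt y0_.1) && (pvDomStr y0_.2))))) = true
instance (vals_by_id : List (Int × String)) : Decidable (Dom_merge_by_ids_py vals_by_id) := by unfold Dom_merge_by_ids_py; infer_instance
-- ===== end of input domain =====

-- B groups consecutive equal-valued ids with groupby and emits one triple per group,
-- instead of A's loop that mutates the last appended triple; same cost, more idiomatic.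

-- ===== PORT A =====
-- the 'for id_ in sorted(vals_by_id.keys())' loop; merged_ids[-1][1] = id_ becomes
-- dropLast ++ [updated last]
def pvAloop (d : PySem.Dict Int String) : List Int → List (Int × Int × String) → List (Int × Int × String)
  | [], merged => merged
  | k :: ks, merged =>
    let nv := d.getD k ""
    match merged.getLast? with
    | some (i1, i2, v) =>
      if i2 + 1 = k ∧ v = nv then pvAloop d ks (merged.dropLast ++ [(i1, k, v)])
      else pvAloop d ks (merged ++ [(k, k, nv)])
    | none => pvAloop d ks (merged ++ [(k, k, nv)])

def merge_by_ids_py (vals_by_id : List (Int × String)) : List (Int × Int × String) :=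
  let d := PySem.Dict.ofList vals_by_id
  pvAloop d (PySem.List.sorted d.keys (fun x => x) false) []

-- ===== PORT B =====
-- itertools.groupby with key (vals_by_id[id], id - index): consume one maximal group
-- of consecutive equal-valued ids (pvTakeRun), emit (first, last, value), recurse.
def pvTakeRun (d : PySem.Dict Int String) (prev : Int) (v : String) : List Int → Int × List Int
  | [] => (prev, [])
  | k :: ks => if k = prev + 1 ∧ d.getD k "" = v then pvTakeRun d k v ks else (prev, k :: ks)

theorem pvTakeRun_len (d : PySem.Dict Int String) (v : String) :
    ∀ (ks : List Int) (prev : Int), (pvTakeRun d prev v ks).2.length ≤ ks.length := by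
  intro ks
  induction ks with
  | nil => intro prev; simp [pvTakeRun]
  | cons k ks ih =>
    intro prev
    simp only [pvTakeRun]
    split
    · exact le_trans (ih k) (Nat.le_succ _)
    · simp

def pvRuns (d : PySem.Dict Int String) : List Int → List (Int × Int × String)
  | [] => []
  | k :: ks =>
    let v := d.getD k ""
    let r := pvTakeRun d k v ks
    (k, r.1, v) :: pvRuns d r.2
termination_by ks => ks.length
decreasing_by
  exact Nat.lt_succ_of_le (pvTakeRun_len d _ ks k)

def merge_by_ids_py_alt (vals_by_id : List (Int × String)) : List (Int × Int × String) :=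
  let d := PySem.Dict.ofList vals_by_id
  pvRuns d (PySem.List.sorted d.keys (fun x => x) false)

-- ===== PRECONDITION & SPEC =====
def Spec_merge_by_ids_py (vals_by_id : List (Int × String)) (out : List (Int × Int × String)) : Prop := out = merge_by_ids_py_alt vals_by_id
instance (vals_by_id : List (Int × String)) (out : List (Int × Int × String)) : Decidable (Spec_merge_by_ids_py vals_by_id out) := by unfold Spec_merge_by_ids_py; infer_instance

-- ===== CLAIM (what is proved, stated in full; the proofs are below) =====
def Claim_equal_merge_by_ids_py : Prop := ∀ (vals_by_id : List (Int × String)), Dom_merge_by_ids_py vals_by_id → Spec_merge_by_ids_py vals_by_id (merge_by_ids_py vals_by_id)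

-- ===== LEMMAS AND PROOFS =====

-- A's loop, run with a non-empty accumulator, appends exactly the runs of the
-- remaining keys, the first run extending the accumulator's last triple.
theorem pvAloop_eq (d : PySem.Dict Int String) :
    ∀ (ks : List Int) (acc : List (Int × Int × String)) (i1 i2 : Int) (v : String),
      pvAloop d ks (acc ++ [(i1, i2, v)]) =
        acc ++ ((i1, (pvTakeRun d i2 v ks).1, v) :: pvRuns d (pvTakeRun d i2 v ks).2) := by
  intro ks
  induction ks with
  | nil => intro acc i1 i2 v; simp [pvAloop, pvTakeRun, pvRuns]
  | cons k ks ih =>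
    intro acc i1 i2 v
    simp only [pvAloop, List.getLast?_concat, List.dropLast_concat, pvTakeRun]
    by_cases h1 : i2 + 1 = k
    · by_cases h2 : v = d.getD k ""
      · have hc : k = i2 + 1 ∧ d.getD k "" = v := ⟨h1.symm, h2.symm⟩
        rw [if_pos ⟨h1, h2⟩, if_pos hc, ih]
      · have hc : ¬(k = i2 + 1 ∧ d.getD k "" = v) := fun h => h2 h.2.symm
        rw [if_neg (fun h => h2 h.2), if_neg hc,
            show acc ++ [(i1, i2, v)] = (acc ++ [(i1, i2, v)]) from rfl, ih, pvRuns]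
        simp
    · have hc : ¬(k = i2 + 1 ∧ d.getD k "" = v) := fun h => h1 h.1.symm
      rw [if_neg (fun h => h1 h.1), if_neg hc, ih, pvRuns]
      simp

theorem pvAloop_eq_runs (d : PySem.Dict Int String) (ks : List Int) :
    pvAloop d ks [] = pvRuns d ks := by
  cases ks with
  | nil => simp [pvAloop, pvRuns]
  | cons k ks =>
    have h := pvAloop_eq d ks [] k k (d.getD k "")
    simp only [List.nil_append] at h
    simp only [pvAloop, List.getLast?_nil, List.nil_append, pvRuns]
    exact h

-- ===== VERDICT (by name: the statement is the Claim_ definition above) =====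
theorem merge_by_ids_py_spec : Claim_equal_merge_by_ids_py := by
  intro vals_by_id _
  unfold Spec_merge_by_ids_py merge_by_ids_py merge_by_ids_py_alt
  exact pvAloop_eq_runs _ _
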